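-- pv_equiv track=rewrite | github.com/bilal07karadeniz/Grafyx | ml/source_token_filter/features.py | _is_in_import_context
-- ===== SOURCE A (Python) =====
-- def _is_in_import_context(token: str, lines: list[str]) -> bool:
--     """Check if all occurrences of token are in import statements."""
--     token_lower = token.lower()
--     found_any = False
--     for line in lines:
--         line_lower = line.lower()
--         if token_lower not in line_lower:
--             continue
--         found_any = True
--         stripped = line.strip()
--         if not (stripped.startswith("import ") or stripped.startswith("from ")):
--             return False
--     return found_any
-- ===== SOURCE B (Python) =====
-- def _is_in_import_context(token: str, lines: list[str]) -> bool:
--     """Check if all occurrences of token are in import statements."""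
--     t = token.lower()
--     import_lines, other_lines = [], []
--     for line in lines:
--         if line.strip().startswith(("import ", "from ")):
--             import_lines.append(line)
--         else:
--             other_lines.append(line)
--     if any(t in line.lower() for line in other_lines):
--         return False
--     return any(t in line.lower() for line in import_lines)
-- ===== Notes on version B (the rewrite author's own statement) =====
-- stated objective: alternative
-- what changed: Inverts the test order: instead of scanning for token-matching lines and checking their prefix with a found_any flag, B first partitions all lines by the import/from prefix (a token-independent classification), then rejects if the token occurs in any non-import line and otherwise returns whether it occurs in any import line.
import Mathlib
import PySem

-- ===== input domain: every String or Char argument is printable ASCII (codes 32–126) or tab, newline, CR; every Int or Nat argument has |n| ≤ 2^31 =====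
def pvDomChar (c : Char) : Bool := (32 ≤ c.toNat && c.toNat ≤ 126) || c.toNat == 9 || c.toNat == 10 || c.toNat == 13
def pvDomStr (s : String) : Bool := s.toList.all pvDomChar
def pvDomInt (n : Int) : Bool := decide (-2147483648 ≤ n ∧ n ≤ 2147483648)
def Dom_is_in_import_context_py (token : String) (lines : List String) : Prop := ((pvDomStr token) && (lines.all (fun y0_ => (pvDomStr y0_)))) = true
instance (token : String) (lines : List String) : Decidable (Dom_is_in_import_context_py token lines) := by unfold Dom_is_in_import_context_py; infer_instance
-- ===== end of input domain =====

-- B inverts the test order: it partitions all lines by the import/from prefix first (token-independent), then searches the token per bucket; A scans once with a found_any flag checking the prefix only on matching lines (objective: alternative).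

-- ===== PORT A =====
-- the loop body of A: found_any is the Bool accumulator, the mid-loop 'return False' is the 'false' branch
def is_in_import_context_py_loop (tokenLower : List Char) : List String → Bool → Bool
  | [], found_any => found_any
  | line :: rest, found_any =>
    let line_lower := PySem.Chars.lower line.toList
    if PySem.Chars.isIn tokenLower line_lower = false then
      is_in_import_context_py_loop tokenLower rest found_any
    else
      let stripped := PySem.Chars.strip line.toList
      if !(PySem.Chars.startswith stripped "import ".toList || PySem.Chars.startswith stripped "from ".toList) then
        false
      else
        is_in_import_context_py_loop tokenLower rest true

def is_in_import_context_py (token : String) (lines : List String) : Bool :=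
  is_in_import_context_py_loop (PySem.Chars.lower token.toList) lines false

-- ===== PORT B =====
-- 'line.strip().startswith(("import ", "from "))'
def alt_is_import (line : String) : Bool :=
  let s := PySem.Chars.strip line.toList
  PySem.Chars.startswith s "import ".toList || PySem.Chars.startswith s "from ".toList

-- 't in line.lower()'
def alt_matches (t : List Char) (line : String) : Bool :=
  PySem.Chars.isIn t (PySem.Chars.lower line.toList)

-- the classification loop filling import_lines / other_lines
def alt_partition : List String → List String × List String → List String × List String
  | [], acc => acc
  | line :: rest, acc =>
    if alt_is_import line then alt_partition rest (acc.1 ++ [line], acc.2)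
    else alt_partition rest (acc.1, acc.2 ++ [line])

def is_in_import_context_py_alt (token : String) (lines : List String) : Bool :=
  let t := PySem.Chars.lower token.toList
  let p := alt_partition lines ([], [])
  if p.2.any (alt_matches t) then false
  else p.1.any (alt_matches t)

-- ===== PRECONDITION & SPEC =====
def Spec_is_in_import_context_py (token : String) (lines : List String) (out : Bool) : Prop := out = is_in_import_context_py_alt token lines
instance (token : String) (lines : List String) (out : Bool) : Decidable (Spec_is_in_import_context_py token lines out) := by unfold Spec_is_in_import_context_py; infer_instance

-- ===== CLAIM =====
def Claim_equal_is_in_import_context_py : Prop := ∀ (token : String) (lines : List String), Dom_is_in_import_context_py token lines → Spec_is_in_import_context_py token lines (is_in_import_context_py token lines)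

-- ===== LEMMAS AND PROOFS =====
theorem loop_cons (t : List Char) (line : String) (rest : List String) (found : Bool) :
    is_in_import_context_py_loop t (line :: rest) found =
      (if alt_matches t line = false then is_in_import_context_py_loop t rest found
       else if !(alt_is_import line) then false
       else is_in_import_context_py_loop t rest true) := rfl

-- invariant of A's loop: result = (found OR some line matches) AND every matching line is an import line
theorem loop_eq_filter (t : List Char) (ls : List String) (found : Bool) :
    is_in_import_context_py_loop t ls found =
      ((found || (ls.filter (alt_matches t) ≠ [] : Bool)) &&
        (ls.filter (alt_matches t)).all alt_is_import) := by
  induction ls generalizing found with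
  | nil => simp [is_in_import_context_py_loop]
  | cons line rest ih =>
    rw [loop_cons, List.filter_cons]
    cases hm : alt_matches t line
    · simp [ih]
    · cases hi : alt_is_import line
      · simp [hi]
      · simp [hi, ih]

-- B's partition loop computes the two filters
theorem partition_eq (ls : List String) (acc : List String × List String) :
    alt_partition ls acc =
      (acc.1 ++ ls.filter alt_is_import, acc.2 ++ ls.filter (fun l => !alt_is_import l)) := by
  induction ls generalizing acc with
  | nil => simp [alt_partition]
  | cons line rest ih =>
    unfold alt_partition
    cases hi : alt_is_import line <;> simp [hi, ih]

-- the two decompositions agree, as a pure list fact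
theorem buckets_eq (t : List Char) (ls : List String) :
    (if (ls.filter (fun l => !alt_is_import l)).any (alt_matches t) then false
     else (ls.filter alt_is_import).any (alt_matches t)) =
      (((ls.filter (alt_matches t) ≠ [] : Bool)) &&
        (ls.filter (alt_matches t)).all alt_is_import) := by
  induction ls with
  | nil => simp
  | cons line rest ih =>
    cases hm : alt_matches t line <;> cases hi : alt_is_import line <;>
      simp [hm, hi] <;> simp_all <;>
      · rw [Bool.eq_iff_iff]; simp; tauto

-- ===== VERDICT =====
theorem is_in_import_context_py_spec : Claim_equal_is_in_import_context_py := by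
  intro token lines _
  unfold Spec_is_in_import_context_py is_in_import_context_py is_in_import_context_py_alt
  rw [loop_eq_filter, partition_eq]
  simpa using (buckets_eq (PySem.Chars.lower token.toList) lines).symm
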